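-- pv_equiv track=rewrite | github.com/BackupTheBerlios/pdeb-svn | trunk/pdeb/debconf_parser.py | slice_debconf
-- ===== SOURCE A (Python) =====
-- def slice_debconf(pacote):
--     res = []
--     zona = 0
--
--     for line in pacote:
--         if zona == 1:
--             if '!' in line:
--                 res.append(line)
--             else:
--                 zona = 0
--
--         if 'PODEBCONF:\n' == line:
--             zona = 1
--
--     return res
-- ===== SOURCE B (Python) =====
-- def slice_debconf(pacote):
--     pacote = list(pacote)
--     res = []
--     i = 0
--     n = len(pacote)
--     while i < n:
--         if pacote[i] == 'PODEBCONF:\n':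
--             i += 1
--             while i < n and '!' in pacote[i]:
--                 res.append(pacote[i])
--                 i += 1
--             # do not advance: the breaking line is re-examined by the outer loop
--         else:
--             i += 1
--     return res
-- ===== Notes on version B (the rewrite author's own statement) =====
-- stated objective: alternative
-- what changed: Replaced A's single pass with a zona flag by an explicit index scan that, on each marker line, runs an inner while-loop collecting the '!'-lines and leaves the breaking line for the outer loop to re-examine.
import Mathlib
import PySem

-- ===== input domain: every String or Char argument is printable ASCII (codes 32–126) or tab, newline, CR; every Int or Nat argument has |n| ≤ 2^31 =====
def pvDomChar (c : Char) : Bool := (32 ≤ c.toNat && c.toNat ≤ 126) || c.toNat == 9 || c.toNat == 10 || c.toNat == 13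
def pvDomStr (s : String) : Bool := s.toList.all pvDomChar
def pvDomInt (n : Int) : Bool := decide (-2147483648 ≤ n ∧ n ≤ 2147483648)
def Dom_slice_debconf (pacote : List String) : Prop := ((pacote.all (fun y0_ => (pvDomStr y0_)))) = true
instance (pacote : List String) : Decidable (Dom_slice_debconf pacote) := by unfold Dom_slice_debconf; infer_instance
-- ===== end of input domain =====

-- B rewrites the one-pass flag state machine as an index scan with an explicit inner
-- collection loop after each marker (objective: alternative decomposition, same cost).

-- ===== PORT A =====
-- A: single fold over the lines with state (res, zona).
def sliceDebconfStepA (st : List String × Int) (line : String) : List String × Int :=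
  let st1 :=
    if st.2 == 1 then
      (if PySem.Str.isIn "!" line then (st.1 ++ [line], st.2) else (st.1, (0 : Int)))
    else st
  if line == "PODEBCONF:\n" then (st1.1, (1 : Int)) else st1

def slice_debconf (pacote : List String) : List String :=
  (pacote.foldl sliceDebconfStepA ([], 0)).1

-- ===== PORT B =====
-- B's inner while-loop: collect lines containing '!' from the current suffix,
-- returning (collected lines, remaining suffix = the breaking line onwards).
def sliceDebconfInner : List String → List String × List String
  | [] => ([], [])
  | l :: rest =>
    if PySem.Str.isIn "!" l then
      let p := sliceDebconfInner rest
      (l :: p.1, p.2)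
    else ([], l :: rest)

-- needed by the outer loop's termination (the suffix after the inner loop is no longer)
theorem sliceDebconfInner_len (xs : List String) :
    (sliceDebconfInner xs).2.length ≤ xs.length := by
  induction xs with
  | nil => simp [sliceDebconfInner]
  | cons l rest ih =>
    simp only [sliceDebconfInner]
    split
    · simpa using Nat.le_succ_of_le ih
    · simp

-- B's outer scan: the index i over list(pacote) is the current suffix; after the inner
-- loop the breaking line stays at the head so the outer loop re-examines it.
def sliceDebconfGo : List String → List String
  | [] => []
  | l :: rest =>
    if l == "PODEBCONF:\n" then
      let p := sliceDebconfInner rest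
      p.1 ++ sliceDebconfGo p.2
    else sliceDebconfGo rest
termination_by xs => xs.length
decreasing_by
  · exact Nat.lt_succ_of_le (sliceDebconfInner_len rest)
  · simp

def slice_debconf_alt (pacote : List String) : List String := sliceDebconfGo pacote

-- ===== PRECONDITION & SPEC =====
def Spec_slice_debconf (pacote : List String) (out : List String) : Prop := out = slice_debconf_alt pacote
instance (pacote : List String) (out : List String) : Decidable (Spec_slice_debconf pacote out) := by unfold Spec_slice_debconf; infer_instance

-- ===== CLAIM (what is proved, stated in full; the proofs are below) =====
def Claim_equal_slice_debconf : Prop := ∀ (pacote : List String), Dom_slice_debconf pacote → Spec_slice_debconf pacote (slice_debconf pacote)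

-- ===== LEMMAS AND PROOFS =====

-- Simultaneous characterisation of A's fold from both zona states.
theorem foldA_char (l : List String) :
    (∀ res : List String, (l.foldl sliceDebconfStepA (res, 0)).1 = res ++ sliceDebconfGo l) ∧
    (∀ res : List String, (l.foldl sliceDebconfStepA (res, 1)).1 =
      res ++ (sliceDebconfInner l).1 ++ sliceDebconfGo (sliceDebconfInner l).2) := by
  induction l with
  | nil => simp [sliceDebconfGo, sliceDebconfInner]
  | cons x rest ih =>
    constructor
    · intro res
      by_cases hm : x == "PODEBCONF:\n"
      · simp only [List.foldl_cons, sliceDebconfStepA, hm]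
        simp only [show ((0 : Int) == 1) = false from rfl, Bool.false_eq_true, if_false, if_true]
        rw [ih.2 res]
        simp [sliceDebconfGo, hm]
      · simp only [List.foldl_cons, sliceDebconfStepA, hm]
        simp only [show ((0 : Int) == 1) = false from rfl, Bool.false_eq_true, if_false]
        rw [ih.1 res]
        simp [sliceDebconfGo, hm]
    · intro res
      by_cases hb : PySem.Str.isIn "!" x
      · -- line with '!': appended, zona stays 1 (the marker has no '!', but even the
        -- marker check would only re-set zona to 1)
        by_cases hm : x == "PODEBCONF:\n"
        · exfalso
          have : x = "PODEBCONF:\n" := by simpa using hm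
          subst this
          revert hb; decide
        · simp only [List.foldl_cons, sliceDebconfStepA, hm]
          simp only [show ((1 : Int) == 1) = true from rfl, if_true, hb, Bool.false_eq_true, if_false]
          rw [ih.2 (res ++ [x])]
          simp only [sliceDebconfInner, if_pos hb]
          simp
      · -- line without '!': zona drops to 0, then the marker check may re-arm it
        by_cases hm : x == "PODEBCONF:\n"
        · simp only [List.foldl_cons, sliceDebconfStepA, hm]
          simp only [show ((1 : Int) == 1) = true from rfl, if_true, hb, Bool.false_eq_true, if_false]
          rw [ih.2 res]
          simp only [sliceDebconfInner, if_neg hb]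
          simp only [sliceDebconfGo, if_pos hm]
          simp
        · simp only [List.foldl_cons, sliceDebconfStepA, hm]
          simp only [show ((1 : Int) == 1) = true from rfl, if_true, hb, Bool.false_eq_true, if_false]
          rw [ih.1 res]
          simp only [sliceDebconfInner, if_neg hb]
          simp only [sliceDebconfGo, if_neg hm]
          simp

-- ===== VERDICT (by name: the statement is the Claim_ definition above) =====
theorem slice_debconf_spec : Claim_equal_slice_debconf := by
  intro pacote _
  unfold Spec_slice_debconf slice_debconf slice_debconf_alt
  simpa using (foldA_char pacote).1 []
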